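-- pv_equiv track=rewrite | github.com/Karthik-Parvathaneni/Readme_Generator | readme_generator/summarizer.py | _summarize_refactor
-- ===== SOURCE A (Python) =====
-- from typing import Dict, List
--
-- def _summarize_refactor(descriptions: List[str], key_terms: List[str]) -> str:
--     """Create detailed summary for refactoring commits."""
--     count = len(descriptions)
--     if count == 0:
--         return ""
--
--     desc_text = " ".join(descriptions).lower()
--
--     # Categorize refactoring efforts
--     refactor_categories = {}
--
--     # Code Structure & Architecture
--     structure_refactors = [d for d in descriptions if any(term in d.lower() for term in ['structure', 'architecture', 'organize', 'modular', 'component', 'class'])]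
--     if structure_refactors:
--         refactor_categories["Code Architecture"] = f"Restructured codebase architecture with {len(structure_refactors)} improvements focusing on modularity, component organization, and structural clarity."
--
--     # Performance Optimization
--     perf_refactors = [d for d in descriptions if any(term in d.lower() for term in ['performance', 'optimize', 'efficient', 'speed', 'memory', 'cache'])]
--     if perf_refactors:
--         refactor_categories["Performance Optimization"] = f"Optimized code performance through {len(perf_refactors)} refactoring efforts targeting efficiency, speed improvements, and resource utilization."
--
--     # Code Quality & Maintainability
--     quality_refactors = [d for d in descriptions if any(term in d.lower() for term in ['clean', 'simplify', 'readable', 'maintainable', 'quality', 'standard'])]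
--     if quality_refactors:
--         refactor_categories["Code Quality"] = f"Enhanced code quality with {len(quality_refactors)} refactoring improvements focusing on readability, maintainability, and coding standards."
--
--     # API & Interface Design
--     api_refactors = [d for d in descriptions if any(term in d.lower() for term in ['api', 'interface', 'method', 'function', 'signature', 'endpoint'])]
--     if api_refactors:
--         refactor_categories["API Design"] = f"Refined API design through {len(api_refactors)} interface improvements, method restructuring, and endpoint optimization."
--
--     # Dependency & Import Management
--     dep_refactors = [d for d in descriptions if any(term in d.lower() for term in ['dependency', 'import', 'package', 'module', 'library', 'external'])]
--     if dep_refactors: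
--         refactor_categories["Dependency Management"] = f"Improved dependency management with {len(dep_refactors)} refactoring changes to imports, packages, and external library usage."
--
--     # Build comprehensive summary
--     improvement_text = "improvement" if count == 1 else "improvements"
--     summary_parts = [f"Extensive codebase refactoring with {count} {improvement_text} enhancing code quality and maintainability:"]
--
--     for category_name, category_desc in refactor_categories.items():
--         summary_parts.append(f"\n• **{category_name}**: {category_desc}")
--
--     if not refactor_categories:
--         # Fallback for unrecognized patterns
--         summary_parts.append(f"\n• **General Refactoring**: Improved code organization, maintainability, and architectural design through systematic refactoring efforts.")
--
--     summary_parts.append(f"\n\nThese refactoring efforts result in cleaner, more maintainable code that is easier to understand, modify, and extend while improving overall system architecture.")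
--
--     return "".join(summary_parts)
-- ===== SOURCE B (Python) =====
-- from typing import List
--
-- # (name, keywords, template taking the per-category count)
-- _SPECS = [
--     ("Code Architecture",
--      ('structure', 'architecture', 'organize', 'modular', 'component', 'class'),
--      lambda n: f"Restructured codebase architecture with {n} improvements focusing on modularity, component organization, and structural clarity."),
--     ("Performance Optimization",
--      ('performance', 'optimize', 'efficient', 'speed', 'memory', 'cache'),
--      lambda n: f"Optimized code performance through {n} refactoring efforts targeting efficiency, speed improvements, and resource utilization."),
--     ("Code Quality",
--      ('clean', 'simplify', 'readable', 'maintainable', 'quality', 'standard'),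
--      lambda n: f"Enhanced code quality with {n} refactoring improvements focusing on readability, maintainability, and coding standards."),
--     ("API Design",
--      ('api', 'interface', 'method', 'function', 'signature', 'endpoint'),
--      lambda n: f"Refined API design through {n} interface improvements, method restructuring, and endpoint optimization."),
--     ("Dependency Management",
--      ('dependency', 'import', 'package', 'module', 'library', 'external'),
--      lambda n: f"Improved dependency management with {n} refactoring changes to imports, packages, and external library usage."),
-- ]
--
--
-- def _summarize_refactor(descriptions: List[str], key_terms: List[str]) -> str:
--     count = len(descriptions)
--     if count == 0:
--         return ""
--
--     # one pass over the descriptions, lowercasing each exactly once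
--     counts = [0] * len(_SPECS)
--     for d in descriptions:
--         low = d.lower()
--         for i, (_, terms, _) in enumerate(_SPECS):
--             if any(t in low for t in terms):
--                 counts[i] += 1
--
--     improvement_text = "improvement" if count == 1 else "improvements"
--     parts = [f"Extensive codebase refactoring with {count} {improvement_text} enhancing code quality and maintainability:"]
--
--     matched = False
--     for (name, _, template), n in zip(_SPECS, counts):
--         if n:
--             matched = True
--             parts.append(f"\n• **{name}**: {template(n)}")
--     if not matched:
--         parts.append("\n• **General Refactoring**: Improved code organization, maintainability, and architectural design through systematic refactoring efforts.")
--
--     parts.append("\n\nThese refactoring efforts result in cleaner, more maintainable code that is easier to understand, modify, and extend while improving overall system architecture.")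
--     return "".join(parts)
-- ===== Notes on version B (the rewrite author's own statement) =====
-- stated objective: alternative
-- what changed: Replaces five per-category list comprehensions (each re-lowercasing every description) and a dict accumulator with a fixed spec table and a single transposed pass over the descriptions that lowercases each once and maintains per-category counters, emitting the lines directly in table order.
import Mathlib
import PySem

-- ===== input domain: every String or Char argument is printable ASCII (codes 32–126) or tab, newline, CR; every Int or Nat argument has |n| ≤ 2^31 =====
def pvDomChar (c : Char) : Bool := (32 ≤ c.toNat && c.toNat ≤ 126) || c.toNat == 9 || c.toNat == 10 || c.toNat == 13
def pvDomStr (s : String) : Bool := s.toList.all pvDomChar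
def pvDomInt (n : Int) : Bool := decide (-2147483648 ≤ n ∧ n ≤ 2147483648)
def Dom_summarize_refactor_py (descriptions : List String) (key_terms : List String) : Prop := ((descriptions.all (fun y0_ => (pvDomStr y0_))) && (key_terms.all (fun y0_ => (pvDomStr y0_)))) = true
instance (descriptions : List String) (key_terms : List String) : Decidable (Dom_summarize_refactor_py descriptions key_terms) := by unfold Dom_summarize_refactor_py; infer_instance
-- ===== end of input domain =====

-- B replaces A's five per-category filter passes (each re-lowercasing every description) and dict accumulator
-- with a fixed spec table and one transposed counting pass (each description lowercased once); objective: alternative, same cost.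
-- ===== PORT A =====
def summarize_refactor_py (descriptions : List String) (key_terms : List String) : String :=
  let count := descriptions.length
  if count = 0 then "" else
  let _desc_text := PySem.Str.lower (PySem.Str.join " " descriptions)
  let refactor_categories : PySem.Dict String String := PySem.Dict.empty
  let structure_refactors := descriptions.filter (fun d =>
    (["structure", "architecture", "organize", "modular", "component", "class"]).any
      (fun term => PySem.Str.isIn term (PySem.Str.lower d)))
  let refactor_categories := if structure_refactors ≠ [] then
      refactor_categories.insert "Code Architecture"
        ("Restructured codebase architecture with " ++ PySem.Int.toStr (structure_refactors.length : Int) ++ " improvements focusing on modularity, component organization, and structural clarity.")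
    else refactor_categories
  let perf_refactors := descriptions.filter (fun d =>
    (["performance", "optimize", "efficient", "speed", "memory", "cache"]).any
      (fun term => PySem.Str.isIn term (PySem.Str.lower d)))
  let refactor_categories := if perf_refactors ≠ [] then
      refactor_categories.insert "Performance Optimization"
        ("Optimized code performance through " ++ PySem.Int.toStr (perf_refactors.length : Int) ++ " refactoring efforts targeting efficiency, speed improvements, and resource utilization.")
    else refactor_categories
  let quality_refactors := descriptions.filter (fun d =>
    (["clean", "simplify", "readable", "maintainable", "quality", "standard"]).any
      (fun term => PySem.Str.isIn term (PySem.Str.lower d)))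
  let refactor_categories := if quality_refactors ≠ [] then
      refactor_categories.insert "Code Quality"
        ("Enhanced code quality with " ++ PySem.Int.toStr (quality_refactors.length : Int) ++ " refactoring improvements focusing on readability, maintainability, and coding standards.")
    else refactor_categories
  let api_refactors := descriptions.filter (fun d =>
    (["api", "interface", "method", "function", "signature", "endpoint"]).any
      (fun term => PySem.Str.isIn term (PySem.Str.lower d)))
  let refactor_categories := if api_refactors ≠ [] then
      refactor_categories.insert "API Design"
        ("Refined API design through " ++ PySem.Int.toStr (api_refactors.length : Int) ++ " interface improvements, method restructuring, and endpoint optimization.")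
    else refactor_categories
  let dep_refactors := descriptions.filter (fun d =>
    (["dependency", "import", "package", "module", "library", "external"]).any
      (fun term => PySem.Str.isIn term (PySem.Str.lower d)))
  let refactor_categories := if dep_refactors ≠ [] then
      refactor_categories.insert "Dependency Management"
        ("Improved dependency management with " ++ PySem.Int.toStr (dep_refactors.length : Int) ++ " refactoring changes to imports, packages, and external library usage.")
    else refactor_categories
  let improvement_text := if count = 1 then "improvement" else "improvements"
  let summary_parts := ["Extensive codebase refactoring with " ++ PySem.Int.toStr (count : Int) ++ " " ++ improvement_text ++ " enhancing code quality and maintainability:"]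
  let summary_parts := refactor_categories.items.foldl
    (fun acc kv => acc ++ ["\n• **" ++ kv.1 ++ "**: " ++ kv.2]) summary_parts
  let summary_parts := if refactor_categories.items = [] then
      summary_parts ++ ["\n• **General Refactoring**: Improved code organization, maintainability, and architectural design through systematic refactoring efforts."]
    else summary_parts
  let summary_parts := summary_parts ++ ["\n\nThese refactoring efforts result in cleaner, more maintainable code that is easier to understand, modify, and extend while improving overall system architecture."]
  PySem.Str.join "" summary_parts

-- ===== PORT B =====
-- spec table of B: (category name, keywords, template applied to the per-category count)
def pvSpecs : List (String × List String × (Int → String)) :=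
  [("Code Architecture",
    (["structure", "architecture", "organize", "modular", "component", "class"],
     fun n => "Restructured codebase architecture with " ++ PySem.Int.toStr n ++ " improvements focusing on modularity, component organization, and structural clarity.")),
   ("Performance Optimization",
    (["performance", "optimize", "efficient", "speed", "memory", "cache"],
     fun n => "Optimized code performance through " ++ PySem.Int.toStr n ++ " refactoring efforts targeting efficiency, speed improvements, and resource utilization.")),
   ("Code Quality",
    (["clean", "simplify", "readable", "maintainable", "quality", "standard"],
     fun n => "Enhanced code quality with " ++ PySem.Int.toStr n ++ " refactoring improvements focusing on readability, maintainability, and coding standards.")),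
   ("API Design",
    (["api", "interface", "method", "function", "signature", "endpoint"],
     fun n => "Refined API design through " ++ PySem.Int.toStr n ++ " interface improvements, method restructuring, and endpoint optimization.")),
   ("Dependency Management",
    (["dependency", "import", "package", "module", "library", "external"],
     fun n => "Improved dependency management with " ++ PySem.Int.toStr n ++ " refactoring changes to imports, packages, and external library usage."))]

def summarize_refactor_py_alt (descriptions : List String) (key_terms : List String) : String :=
  let count := descriptions.length
  if count = 0 then "" else
  -- one pass over the descriptions, lowercasing each exactly once
  let counts := descriptions.foldl
    (fun (counts : List Nat) d =>
      let low := PySem.Str.lower d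
      (counts.zip pvSpecs).map
        (fun ci => if ci.2.2.1.any (fun t => PySem.Str.isIn t low) then ci.1 + 1 else ci.1))
    (List.replicate pvSpecs.length 0)
  let improvement_text := if count = 1 then "improvement" else "improvements"
  let parts := ["Extensive codebase refactoring with " ++ PySem.Int.toStr (count : Int) ++ " " ++ improvement_text ++ " enhancing code quality and maintainability:"]
  let pm := (pvSpecs.zip counts).foldl
    (fun (acc : List String × Bool) sc =>
      if sc.2 ≠ 0 then
        (acc.1 ++ ["\n• **" ++ sc.1.1 ++ "**: " ++ sc.1.2.2 (sc.2 : Int)], true)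
      else acc)
    (parts, false)
  let parts := pm.1
  let parts := if pm.2 = false then
      parts ++ ["\n• **General Refactoring**: Improved code organization, maintainability, and architectural design through systematic refactoring efforts."]
    else parts
  let parts := parts ++ ["\n\nThese refactoring efforts result in cleaner, more maintainable code that is easier to understand, modify, and extend while improving overall system architecture."]
  PySem.Str.join "" parts

-- ===== PRECONDITION & SPEC =====
def Spec_summarize_refactor_py (descriptions : List String) (key_terms : List String) (out : String) : Prop := out = summarize_refactor_py_alt descriptions key_terms
instance (descriptions : List String) (key_terms : List String) (out : String) : Decidable (Spec_summarize_refactor_py descriptions key_terms out) := by unfold Spec_summarize_refactor_py; infer_instance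

-- ===== CLAIM (what is proved, stated in full; the proofs are below) =====
def Claim_equal_summarize_refactor_py : Prop := ∀ (descriptions : List String) (key_terms : List String), Dom_summarize_refactor_py descriptions key_terms → Spec_summarize_refactor_py descriptions key_terms (summarize_refactor_py descriptions key_terms)


-- ===== LEMMAS AND PROOFS =====

-- the shared per-category predicate: some keyword occurs in the lowercased description
def pvP (terms : List String) (d : String) : Bool :=
  terms.any (fun t => PySem.Str.isIn t (PySem.Str.lower d))

-- one step of B's counting loop, written out on the five counters
theorem pv_step (a b c d e : Nat) (x : String) :
    (([a, b, c, d, e].zip pvSpecs).map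
      (fun ci => if ci.2.2.1.any (fun t => PySem.Str.isIn t (PySem.Str.lower x)) then ci.1 + 1 else ci.1))
    = [if pvP ["structure", "architecture", "organize", "modular", "component", "class"] x then a + 1 else a,
       if pvP ["performance", "optimize", "efficient", "speed", "memory", "cache"] x then b + 1 else b,
       if pvP ["clean", "simplify", "readable", "maintainable", "quality", "standard"] x then c + 1 else c,
       if pvP ["api", "interface", "method", "function", "signature", "endpoint"] x then d + 1 else d,
       if pvP ["dependency", "import", "package", "module", "library", "external"] x then e + 1 else e] := rfl

-- B's one-pass counting loop computes the five per-category counts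
theorem pv_counts (ds : List String) (a b c d e : Nat) :
    ds.foldl
      (fun (counts : List Nat) x =>
        let low := PySem.Str.lower x
        (counts.zip pvSpecs).map
          (fun ci => if ci.2.2.1.any (fun t => PySem.Str.isIn t low) then ci.1 + 1 else ci.1))
      [a, b, c, d, e]
    = [a + ds.countP (pvP ["structure", "architecture", "organize", "modular", "component", "class"]),
       b + ds.countP (pvP ["performance", "optimize", "efficient", "speed", "memory", "cache"]),
       c + ds.countP (pvP ["clean", "simplify", "readable", "maintainable", "quality", "standard"]),
       d + ds.countP (pvP ["api", "interface", "method", "function", "signature", "endpoint"]),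
       e + ds.countP (pvP ["dependency", "import", "package", "module", "library", "external"])] := by
  induction ds generalizing a b c d e with
  | nil => simp
  | cons x t ih =>
    simp only [List.foldl_cons]
    rw [pv_step, ih]
    simp only [pvP, List.countP_cons]
    split_ifs <;> simp <;> omega

-- ===== VERDICT (by name: the statement is the Claim_ definition above) =====
theorem summarize_refactor_py_spec : Claim_equal_summarize_refactor_py := by
  intro descriptions key_terms _hdom
  unfold Spec_summarize_refactor_py
  by_cases hnil : descriptions.length = 0
  · simp [summarize_refactor_py, summarize_refactor_py_alt, hnil]
  · unfold summarize_refactor_py summarize_refactor_py_alt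
    simp only [if_neg hnil]
    rw [show List.replicate pvSpecs.length 0 = [0, 0, 0, 0, 0] by rfl]
    rw [pv_counts]
    simp only [Nat.zero_add]
    rw [show (fun (d : String) =>
          (["structure", "architecture", "organize", "modular", "component", "class"]).any
            (fun term => PySem.Str.isIn term (PySem.Str.lower d))) = pvP ["structure", "architecture", "organize", "modular", "component", "class"] from rfl]
    rw [show (fun (d : String) =>
          (["performance", "optimize", "efficient", "speed", "memory", "cache"]).any
            (fun term => PySem.Str.isIn term (PySem.Str.lower d))) = pvP ["performance", "optimize", "efficient", "speed", "memory", "cache"] from rfl]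
    rw [show (fun (d : String) =>
          (["clean", "simplify", "readable", "maintainable", "quality", "standard"]).any
            (fun term => PySem.Str.isIn term (PySem.Str.lower d))) = pvP ["clean", "simplify", "readable", "maintainable", "quality", "standard"] from rfl]
    rw [show (fun (d : String) =>
          (["api", "interface", "method", "function", "signature", "endpoint"]).any
            (fun term => PySem.Str.isIn term (PySem.Str.lower d))) = pvP ["api", "interface", "method", "function", "signature", "endpoint"] from rfl]
    rw [show (fun (d : String) =>
          (["dependency", "import", "package", "module", "library", "external"]).any
            (fun term => PySem.Str.isIn term (PySem.Str.lower d))) = pvP ["dependency", "import", "package", "module", "library", "external"] from rfl]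
    simp only [ne_eq, ← List.length_eq_zero_iff, ← List.countP_eq_length_filter]
    generalize descriptions.countP (pvP ["structure", "architecture", "organize", "modular", "component", "class"]) = c1
    generalize descriptions.countP (pvP ["performance", "optimize", "efficient", "speed", "memory", "cache"]) = c2
    generalize descriptions.countP (pvP ["clean", "simplify", "readable", "maintainable", "quality", "standard"]) = c3
    generalize descriptions.countP (pvP ["api", "interface", "method", "function", "signature", "endpoint"]) = c4
    generalize descriptions.countP (pvP ["dependency", "import", "package", "module", "library", "external"]) = c5
    by_cases h1 : c1 = 0 <;> by_cases h2 : c2 = 0 <;> by_cases h3 : c3 = 0 <;>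
      by_cases h4 : c4 = 0 <;> by_cases h5 : c5 = 0 <;>
      simp [pvSpecs, h1, h2, h3, h4, h5, PySem.Dict.insert,
        PySem.Dict.empty, PySem.Dict.contains]
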